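-- pv_equiv track=rewrite | github.com/mcephas7/LHFX | LHFX_Tool.py | _dependency_guidance
-- ===== SOURCE A (Python) =====
-- from typing import Dict, Iterable, List, Optional, Tuple
--
-- def _dependency_guidance(missing: List[str]) -> str:
--     # Kali/Debian-friendly guidance
--     pkgs = []
--     if any("losetup" in m or "mount" in m or "umount" in m for m in missing):
--         pkgs.extend(["util-linux", "mount"])
--     if any("lsblk" in m for m in missing):
--         pkgs.append("util-linux")
--     if any("blkid" in m for m in missing):
--         pkgs.append("util-linux")
--     if any("e2fsck" in m for m in missing):
--         pkgs.append("e2fsprogs")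
--     if any(m.strip() == "file" or m.startswith("file") for m in missing):
--         pkgs.append("file")
--     pkgs = sorted(set(pkgs))
--     cmd = "sudo apt update && sudo apt install -y " + " ".join(pkgs) if pkgs else "sudo apt update"
--     return (
--         "Missing dependencies detected:\n"
--         f"  - " + "\n  - ".join(missing) + "\n\n"
--         "Copy/paste to install on Kali/Debian:\n"
--         f"  {cmd}\n\n"
--         "Then re-run the tool."
--     )
-- ===== SOURCE B (Python) =====
-- from typing import List
--
--
-- def _dependency_guidance(missing: List[str]) -> str:
--     # One pass over `missing`, collecting the needed packages into a set.
--     needed = set()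
--     for m in missing:
--         if "losetup" in m or "mount" in m or "umount" in m:
--             needed.add("util-linux")
--             needed.add("mount")
--         if "lsblk" in m or "blkid" in m:
--             needed.add("util-linux")
--         if "e2fsck" in m:
--             needed.add("e2fsprogs")
--         if m.strip() == "file" or m.startswith("file"):
--             needed.add("file")
--     pkgs = sorted(needed)
--     cmd = "sudo apt update && sudo apt install -y " + " ".join(pkgs) if pkgs else "sudo apt update"
--     return (
--         "Missing dependencies detected:\n"
--         "  - " + "\n  - ".join(missing) + "\n\n"
--         "Copy/paste to install on Kali/Debian:\n"
--         "  " + cmd + "\n\n"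
--         "Then re-run the tool."
--     )
-- ===== Notes on version B (the rewrite author's own statement) =====
-- stated objective: simpler
-- what changed: Replaces the five separate any(...) scans plus list-append/dedup with a single pass over missing that adds each matching package to a set, then sorts it once.
import Mathlib
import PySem

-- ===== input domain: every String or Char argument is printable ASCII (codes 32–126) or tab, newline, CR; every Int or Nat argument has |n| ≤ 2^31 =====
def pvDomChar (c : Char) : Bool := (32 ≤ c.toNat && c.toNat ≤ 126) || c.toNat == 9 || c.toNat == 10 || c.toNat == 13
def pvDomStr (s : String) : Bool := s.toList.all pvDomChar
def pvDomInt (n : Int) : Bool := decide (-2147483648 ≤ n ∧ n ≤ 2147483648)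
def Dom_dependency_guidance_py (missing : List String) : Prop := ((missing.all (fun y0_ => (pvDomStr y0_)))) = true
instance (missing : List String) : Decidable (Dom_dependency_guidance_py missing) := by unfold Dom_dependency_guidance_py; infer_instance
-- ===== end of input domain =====

-- B replaces A's five separate any(...) scans over `missing` by a single pass that collects the needed packages into a set; objective: simpler.

-- ===== PORT A =====
-- A's five `if any(...)` statements building the pkgs list (before `sorted(set(...))`)
def aPkgs (missing : List String) : List String :=
  let pkgs : List String := []
  let pkgs := if missing.any (fun m => PySem.Str.isIn "losetup" m || PySem.Str.isIn "mount" m || PySem.Str.isIn "umount" m)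
              then pkgs ++ ["util-linux", "mount"] else pkgs
  let pkgs := if missing.any (fun m => PySem.Str.isIn "lsblk" m) then pkgs ++ ["util-linux"] else pkgs
  let pkgs := if missing.any (fun m => PySem.Str.isIn "blkid" m) then pkgs ++ ["util-linux"] else pkgs
  let pkgs := if missing.any (fun m => PySem.Str.isIn "e2fsck" m) then pkgs ++ ["e2fsprogs"] else pkgs
  if missing.any (fun m => PySem.Str.strip m == "file" || PySem.Str.startswith m "file")
  then pkgs ++ ["file"] else pkgs

def dependency_guidance_py (missing : List String) : String :=
  let pkgs := PySem.List.sorted (PySem.Set.ofList (aPkgs missing)) (fun x => x)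
  let cmd := if pkgs.isEmpty then "sudo apt update"
             else "sudo apt update && sudo apt install -y " ++ PySem.Str.join " " pkgs
  "Missing dependencies detected:\n  - " ++ PySem.Str.join "\n  - " missing ++
    "\n\nCopy/paste to install on Kali/Debian:\n  " ++ cmd ++ "\n\nThen re-run the tool."

-- ===== PORT B =====
-- one iteration of B's single loop: add the packages matched by `m` to the set
def depStep (s : PySem.Set String) (m : String) : PySem.Set String :=
  let s := if PySem.Str.isIn "losetup" m || PySem.Str.isIn "mount" m || PySem.Str.isIn "umount" m
           then PySem.Set.add (PySem.Set.add s "util-linux") "mount" else s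
  let s := if PySem.Str.isIn "lsblk" m || PySem.Str.isIn "blkid" m then PySem.Set.add s "util-linux" else s
  let s := if PySem.Str.isIn "e2fsck" m then PySem.Set.add s "e2fsprogs" else s
  if PySem.Str.strip m == "file" || PySem.Str.startswith m "file" then PySem.Set.add s "file" else s

def dependency_guidance_py_alt (missing : List String) : String :=
  let needed := missing.foldl depStep PySem.Set.empty
  let pkgs := PySem.List.sorted needed (fun x => x)
  let cmd := if pkgs.isEmpty then "sudo apt update"
             else "sudo apt update && sudo apt install -y " ++ PySem.Str.join " " pkgs
  "Missing dependencies detected:\n  - " ++ PySem.Str.join "\n  - " missing ++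
    "\n\nCopy/paste to install on Kali/Debian:\n  " ++ cmd ++ "\n\nThen re-run the tool."

-- ===== PRECONDITION & SPEC =====
def Spec_dependency_guidance_py (missing : List String) (out : String) : Prop := out = dependency_guidance_py_alt missing
instance (missing : List String) (out : String) : Decidable (Spec_dependency_guidance_py missing out) := by unfold Spec_dependency_guidance_py; infer_instance

-- ===== CLAIM (what is proved, stated in full; the proofs are below) =====
def Claim_equal_dependency_guidance_py : Prop := ∀ (missing : List String), Dom_dependency_guidance_py missing → Spec_dependency_guidance_py missing (dependency_guidance_py missing)

-- ===== LEMMAS AND PROOFS =====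

-- membership in A's raw pkgs list, over abstract conditions
theorem mem_build (c1 c2 c3 c4 c5 : Bool) (x : String) :
    x ∈ (let p : List String := [];
         let p := if c1 then p ++ ["util-linux", "mount"] else p;
         let p := if c2 then p ++ ["util-linux"] else p;
         let p := if c3 then p ++ ["util-linux"] else p;
         let p := if c4 then p ++ ["e2fsprogs"] else p;
         if c5 then p ++ ["file"] else p)
      ↔ (c1 = true ∧ (x = "util-linux" ∨ x = "mount"))
        ∨ ((c2 || c3) = true ∧ x = "util-linux")
        ∨ (c4 = true ∧ x = "e2fsprogs")
        ∨ (c5 = true ∧ x = "file") := by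
  rcases c1 <;> rcases c2 <;> rcases c3 <;> rcases c4 <;> rcases c5 <;> simp <;> tauto

theorem mem_aPkgs (missing : List String) (x : String) :
    x ∈ aPkgs missing
      ↔ (missing.any (fun m => PySem.Str.isIn "losetup" m || PySem.Str.isIn "mount" m || PySem.Str.isIn "umount" m) = true
           ∧ (x = "util-linux" ∨ x = "mount"))
        ∨ ((missing.any (fun m => PySem.Str.isIn "lsblk" m) || missing.any (fun m => PySem.Str.isIn "blkid" m)) = true
           ∧ x = "util-linux")
        ∨ (missing.any (fun m => PySem.Str.isIn "e2fsck" m) = true ∧ x = "e2fsprogs")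
        ∨ (missing.any (fun m => PySem.Str.strip m == "file" || PySem.Str.startswith m "file") = true ∧ x = "file") := by
  unfold aPkgs
  generalize (missing.any (fun m => PySem.Str.isIn "losetup" m || PySem.Str.isIn "mount" m || PySem.Str.isIn "umount" m)) = c1
  generalize (missing.any (fun m => PySem.Str.isIn "lsblk" m)) = c2
  generalize (missing.any (fun m => PySem.Str.isIn "blkid" m)) = c3
  generalize (missing.any (fun m => PySem.Str.isIn "e2fsck" m)) = c4
  generalize (missing.any (fun m => PySem.Str.strip m == "file" || PySem.Str.startswith m "file")) = c5
  exact mem_build c1 c2 c3 c4 c5 x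

-- membership in one step of B's loop
theorem mem_depStep (s : PySem.Set String) (m x : String) :
    x ∈ depStep s m ↔ x ∈ s
      ∨ ((PySem.Str.isIn "losetup" m || PySem.Str.isIn "mount" m || PySem.Str.isIn "umount" m) = true
           ∧ (x = "util-linux" ∨ x = "mount"))
      ∨ ((PySem.Str.isIn "lsblk" m || PySem.Str.isIn "blkid" m) = true ∧ x = "util-linux")
      ∨ (PySem.Str.isIn "e2fsck" m = true ∧ x = "e2fsprogs")
      ∨ ((PySem.Str.strip m == "file" || PySem.Str.startswith m "file") = true ∧ x = "file") := by
  unfold depStep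
  generalize (PySem.Str.isIn "losetup" m || PySem.Str.isIn "mount" m || PySem.Str.isIn "umount" m) = c1
  generalize (PySem.Str.isIn "lsblk" m || PySem.Str.isIn "blkid" m) = c2
  generalize (PySem.Str.isIn "e2fsck" m) = c3
  generalize (PySem.Str.strip m == "file" || PySem.Str.startswith m "file") = c4
  rcases c1 <;> rcases c2 <;> rcases c3 <;> rcases c4 <;> simp [PySem.Set.mem_add] <;> tauto

-- membership in B's accumulated set
theorem mem_foldl_depStep (missing : List String) (s : PySem.Set String) (x : String) :
    x ∈ missing.foldl depStep s ↔ x ∈ s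
      ∨ (∃ m ∈ missing,
          ((PySem.Str.isIn "losetup" m || PySem.Str.isIn "mount" m || PySem.Str.isIn "umount" m) = true
             ∧ (x = "util-linux" ∨ x = "mount"))
          ∨ ((PySem.Str.isIn "lsblk" m || PySem.Str.isIn "blkid" m) = true ∧ x = "util-linux")
          ∨ (PySem.Str.isIn "e2fsck" m = true ∧ x = "e2fsprogs")
          ∨ ((PySem.Str.strip m == "file" || PySem.Str.startswith m "file") = true ∧ x = "file")) := by
  induction missing generalizing s with
  | nil => simp
  | cons m ms ih =>
      simp only [List.foldl_cons, ih, mem_depStep, List.mem_cons]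
      constructor
      · rintro (h | h)
        · rcases h with h | h
          · exact Or.inl h
          · exact Or.inr ⟨m, Or.inl rfl, h⟩
        · obtain ⟨m', hm', h'⟩ := h
          exact Or.inr ⟨m', Or.inr hm', h'⟩
      · rintro (h | ⟨m', (rfl | hm'), h'⟩)
        · exact Or.inl (Or.inl h)
        · exact Or.inl (Or.inr h')
        · exact Or.inr ⟨m', hm', h'⟩

-- B's set stays duplicate-free along the fold
theorem nodup_foldl_depStep (missing : List String) (s : PySem.Set String) (hs : s.Nodup) :
    (missing.foldl depStep s).Nodup := by
  induction missing generalizing s with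
  | nil => exact hs
  | cons m ms ih =>
      apply ih
      unfold depStep
      split_ifs <;> (repeat apply PySem.Set.nodup_add) <;> exact hs

-- the sorted package lists of the two programs coincide
theorem sorted_pkgs_eq (missing : List String) :
    PySem.List.sorted (PySem.Set.ofList (aPkgs missing)) (fun x => x)
      = PySem.List.sorted (missing.foldl depStep PySem.Set.empty) (fun x => x) := by
  apply (PySem.List.sorted_id_eq_sorted_id_iff_perm _ _).mpr
  apply (List.perm_ext_iff_of_nodup (PySem.Set.nodup_ofList _) (nodup_foldl_depStep _ _ List.nodup_nil)).mpr
  intro x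
  rw [PySem.Set.mem_ofList, mem_aPkgs, mem_foldl_depStep]
  simp only [List.any_eq_true, Bool.or_eq_true, List.not_mem_nil, false_or]
  constructor
  · rintro (⟨⟨m, hm, hp⟩, hx⟩ | ⟨⟨m, hm, hp⟩ | ⟨m, hm, hp⟩, hx⟩ | ⟨⟨m, hm, hp⟩, hx⟩ | ⟨⟨m, hm, hp⟩, hx⟩)
    · exact ⟨m, hm, Or.inl ⟨hp, hx⟩⟩
    · exact ⟨m, hm, Or.inr (Or.inl ⟨Or.inl hp, hx⟩)⟩
    · exact ⟨m, hm, Or.inr (Or.inl ⟨Or.inr hp, hx⟩)⟩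
    · exact ⟨m, hm, Or.inr (Or.inr (Or.inl ⟨hp, hx⟩))⟩
    · exact ⟨m, hm, Or.inr (Or.inr (Or.inr ⟨hp, hx⟩))⟩
  · rintro ⟨m, hm, ⟨hp, hx⟩ | ⟨hp, hx⟩ | ⟨hp, hx⟩ | ⟨hp, hx⟩⟩
    · exact Or.inl ⟨⟨m, hm, hp⟩, hx⟩
    · rcases hp with h | h
      · exact Or.inr (Or.inl ⟨Or.inl ⟨m, hm, h⟩, hx⟩)
      · exact Or.inr (Or.inl ⟨Or.inr ⟨m, hm, h⟩, hx⟩)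
    · exact Or.inr (Or.inr (Or.inl ⟨⟨m, hm, hp⟩, hx⟩))
    · exact Or.inr (Or.inr (Or.inr ⟨⟨m, hm, hp⟩, hx⟩))

-- ===== VERDICT (by name: the statement is the Claim_ definition above) =====
theorem dependency_guidance_py_spec : Claim_equal_dependency_guidance_py := by
  intro missing _
  unfold Spec_dependency_guidance_py dependency_guidance_py dependency_guidance_py_alt
  rw [sorted_pkgs_eq]
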